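-- pv_equiv track=rewrite | github.com/pypi-data/pypi-mirror-211 | packages/jixn-utils/jixn_utils-0.0.3-py3-none-any.whl/jixn_utils/dbmysql.py | classification_of_dict
-- ===== SOURCE A (Python) =====
-- def classification_of_dict(items):
--     itemsz = {}
--     for item in items:
--         type_str = ""
--         for key in item.keys():
--             type_str += key
--         if type_str in itemsz:
--             itemsz[type_str].append(item)
--         else:
--             itemsz[type_str] = [item]
--     return itemsz
-- ===== SOURCE B (Python) =====
-- def classification_of_dict(items):
--     ks = ["".join(item.keys()) for item in items]
--     order = list(dict.fromkeys(ks))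
--     return {k: [item for item, s in zip(items, ks) if s == k] for k in order}
-- ===== Notes on version B (the rewrite author's own statement) =====
-- stated objective: alternative
-- what changed: Replaces the single-pass hash-map accumulation (membership test + append/insert per item) by a three-stage pipeline: precompute every item's key string, dedup those strings in first-appearance order, then build each group with one filtering comprehension over the zipped items.
import Mathlib
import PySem

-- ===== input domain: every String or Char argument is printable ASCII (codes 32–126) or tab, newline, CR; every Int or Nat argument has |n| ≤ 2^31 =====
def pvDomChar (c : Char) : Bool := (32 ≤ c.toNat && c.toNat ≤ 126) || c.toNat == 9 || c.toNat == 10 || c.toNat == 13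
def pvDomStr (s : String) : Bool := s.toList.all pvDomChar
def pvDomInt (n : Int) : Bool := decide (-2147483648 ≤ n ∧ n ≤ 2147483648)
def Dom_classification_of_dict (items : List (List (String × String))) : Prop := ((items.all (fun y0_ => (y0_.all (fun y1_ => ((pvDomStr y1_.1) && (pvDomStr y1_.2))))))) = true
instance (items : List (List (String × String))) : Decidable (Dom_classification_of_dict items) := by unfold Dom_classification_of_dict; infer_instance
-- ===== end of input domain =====

-- B replaces A's one-pass hash-map accumulation by key-list precomputation + ordered dedup + one
-- filtering pass per group (objective: alternative decomposition, same results, no speed claim).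
-- Each Python dict argument is represented by its association list; ports canonicalise an item via
-- PySem.Dict.ofList exactly where Python's dict semantics (unique keys, first position, last value) act.

-- ===== PORT A =====
-- for item in items: type_str = ''.join-loop over item.keys(); append into itemsz[type_str] or create it
def classification_of_dict (items : List (List (String × String))) : List (String × List (List (String × String))) :=
  (items.foldl (fun itemsz item0 =>
      let item := PySem.Dict.ofList item0
      let type_str := item.keys.foldl (fun s k => s ++ k) ""
      if itemsz.contains type_str then
        itemsz.modify type_str [] (fun v => v ++ [item.items])
      else
        itemsz.insert type_str [item.items])
    PySem.Dict.empty).items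

-- ===== PORT B =====
-- ks = ["".join(item.keys()) for item in items]; order = list(dict.fromkeys(ks));
-- {k: [item for item, s in zip(items, ks) if s == k] for k in order}
def classification_of_dict_alt (items : List (List (String × String))) : List (String × List (List (String × String))) :=
  let ks := items.map (fun item0 => PySem.Str.join "" (PySem.Dict.ofList item0).keys)
  let order := PySem.List.dedup ks
  order.map (fun k =>
    (k, ((items.zip ks).filter (fun p => p.2 == k)).map (fun p => (PySem.Dict.ofList p.1).items)))

-- ===== PRECONDITION & SPEC =====
def Spec_classification_of_dict (items : List (List (String × String))) (out : List (String × List (List (String × String)))) : Prop := out = classification_of_dict_alt items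
instance (items : List (List (String × String))) (out : List (String × List (List (String × String)))) : Decidable (Spec_classification_of_dict items out) := by unfold Spec_classification_of_dict; infer_instance

-- ===== CLAIM (what is proved, stated in full; the proofs are below) =====
def Claim_equal_classification_of_dict : Prop := ∀ (items : List (List (String × String))), Dom_classification_of_dict items → Spec_classification_of_dict items (classification_of_dict items)

-- ===== LEMMAS AND PROOFS =====

-- the key string both programs compute for one item
def pvKey (item0 : List (String × String)) : String :=
  (PySem.Dict.ofList item0).keys.foldl (fun s k => s ++ k) ""

-- joining with the empty separator is flattening
lemma intercalate_nil_flatten (xs : List (List Char)) : List.intercalate [] xs = xs.flatten := by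
  induction xs with
  | nil => simp [List.intercalate]
  | cons a t ih =>
      cases t with
      | nil => simp [List.intercalate]
      | cons b t2 =>
          rw [show List.intercalate ([] : List Char) (a :: b :: t2)
                = a ++ List.intercalate [] (b :: t2) from by
              simp [List.intercalate, List.intersperse]]
          simp [ih]

-- ''.join(parts) equals the += loop over parts
lemma join_eq_foldl (parts : List String) :
    PySem.Str.join "" parts = parts.foldl (fun s k => s ++ k) "" := by
  have key : ∀ (acc : String), (parts.foldl (fun s k => s ++ k) acc).toList
      = acc.toList ++ (parts.map String.toList).flatten := by
    induction parts with
    | nil => intro acc; simp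
    | cons p ps ih => intro acc; simp [ih, String.toList_append]
  apply String.toList_injective
  rw [key]
  simp [PySem.Str.join, PySem.Chars.join, intercalate_nil_flatten]

-- B's zip-filter group equals the filter over items
lemma zip_filter_group (items : List (List (String × String))) (f : List (String × String) → String) (k : String) :
    ((items.zip (items.map f)).filter (fun p => p.2 == k)).map (fun p => (PySem.Dict.ofList p.1).items)
      = (items.filter (fun it => f it == k)).map (fun it => (PySem.Dict.ofList it).items) := by
  induction items with
  | nil => rfl
  | cons x xs ih =>
      by_cases h : f x == k <;> simp [h, ih]

theorem classification_of_dict_spec : Claim_equal_classification_of_dict := by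
  intro items _
  unfold Spec_classification_of_dict classification_of_dict classification_of_dict_alt
  -- A's loop body is a single Dict.modify, whichever branch runs
  have hstep : (items.foldl (fun itemsz item0 =>
      let item := PySem.Dict.ofList item0
      let type_str := item.keys.foldl (fun s k => s ++ k) ""
      if itemsz.contains type_str then
        itemsz.modify type_str [] (fun v => v ++ [item.items])
      else
        itemsz.insert type_str [item.items]) PySem.Dict.empty)
      = items.foldl (fun d it =>
          d.modify (pvKey it) [] (fun v => v ++ [(PySem.Dict.ofList it).items])) PySem.Dict.empty := by
    apply PySem.List.foldl_congr_mem
    intro d it _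
    by_cases h : d.contains (pvKey it)
    · simp only [pvKey] at h ⊢
      simp [h]
    · have h' : d.contains (pvKey it) = false := by simpa using h
      have hg := PySem.Dict.getD_of_not_contains d ([] : List (List (String × String))) h'
      simp only [pvKey] at h' hg ⊢
      simp [h', PySem.Dict.modify, hg]
  rw [hstep]
  set F := fun d (it : List (String × String)) =>
    PySem.Dict.modify d (pvKey it) [] (fun v => v ++ [(PySem.Dict.ofList it).items]) with hF
  -- keys of A's dict: ordered dedup of the key strings
  have hkeys : (items.foldl F PySem.Dict.empty).keys = PySem.Set.ofList (items.map pvKey) := by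
    rw [hF]
    rw [PySem.Dict.keys_foldl_modify_key items pvKey []
      (fun _ it => (fun v => v ++ [(PySem.Dict.ofList it).items])) PySem.Dict.empty]
    simp [PySem.Set.update, PySem.Set.ofList, PySem.Dict.keys_empty, PySem.Set.empty]
  have hnodup : (items.foldl F PySem.Dict.empty).keys.Nodup := by
    rw [hF]
    exact PySem.Dict.nodup_keys_foldl_modify_key items pvKey [] _ _ PySem.Dict.nodup_keys_empty
  -- values of A's dict at key k: the filtered items
  have hgetD : ∀ k, (items.foldl F PySem.Dict.empty).getD k []
      = (items.filter (fun it => pvKey it == k)).map (fun it => (PySem.Dict.ofList it).items) := by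
    intro k
    rw [hF]
    have := PySem.Dict.getD_foldl_modify_append
      (items.map (fun it => (pvKey it, (PySem.Dict.ofList it).items))) PySem.Dict.empty k
    rw [List.foldl_map] at this
    simpa [List.filter_map, Function.comp, List.map_map] using this
  rw [PySem.Dict.items_eq_map_keys _ hnodup [], hkeys]
  have hks : items.map (fun item0 => PySem.Str.join "" (PySem.Dict.ofList item0).keys) = items.map pvKey := by
    apply List.map_congr_left; intro it _; exact join_eq_foldl _
  simp only [hks, PySem.List.dedup_eq_ofList]
  apply List.map_congr_left
  intro k _
  rw [hgetD k, zip_filter_group items pvKey k]
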